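-- pv_equiv track=rewrite | github.com/wilmurillo-ai/Design-Assistant | .skills/openclaw-skills/skills/gandli-2025/claw-compactor/scripts/lib/rle.py | compress_repeated_headers
-- ===== SOURCE A (Python) =====
-- from typing import Dict, List, Optional, Tuple
--
-- def compress_repeated_headers(text: str) -> str:
--     """Compress repeated identical section headers.
--
--     When the same header text appears multiple times, keep only the first
--     and merge contents.
--     """
--     if not text:
--         return ""
--     lines = text.split('\n')
--     seen_headers: Dict[str, int] = {}
--     result: List[str] = []
--     i = 0
--     while i < len(lines):
--         line = lines[i]
--         # Check if this is a header
--         if line.startswith('#'):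
--             header_text = line.lstrip('#').strip()
--             if header_text in seen_headers:
--                 # Skip this header, but keep its body content
--                 i += 1
--                 while i < len(lines) and not lines[i].startswith('#'):
--                     if lines[i].strip():
--                         result.append(lines[i])
--                     i += 1
--                 continue
--             else:
--                 seen_headers[header_text] = len(result)
--         result.append(line)
--         i += 1
--     return '\n'.join(result)
-- ===== SOURCE B (Python) =====
-- def compress_repeated_headers(text: str) -> str:
--     """Compress repeated identical section headers (two-pass section-table version)."""
--     if not text:
--         return ""
--     # pass 1: group lines into sections (header_line_or_None, body_lines)
--     sections = []
--     cur_header = None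
--     cur_body = []
--     for line in text.split('\n'):
--         if line.startswith('#'):
--             sections.append((cur_header, cur_body))
--             cur_header = line
--             cur_body = []
--         else:
--             cur_body.append(line)
--     sections.append((cur_header, cur_body))
--     # pass 2: emit, deduplicating headers by normalized text
--     seen = set()
--     out = []
--     for header, body in sections:
--         if header is None:
--             out.extend(body)
--         else:
--             key = header.lstrip('#').strip()
--             if key in seen:
--                 out.extend(l for l in body if l.strip())
--             else:
--                 seen.add(key)
--                 out.append(header)
--                 out.extend(body)
--     return '\n'.join(out)
-- ===== Notes on version B (the rewrite author's own statement) =====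
-- stated objective: alternative
-- what changed: Replaces A's single interleaved index loop with a nested skip-ahead while by a two-pass decomposition: first parse lines into a section table (optional header line, body lines), then a separate emission pass over sections with a seen-set that keeps first-seen sections whole and drops the header plus blank body lines of duplicates.
import Mathlib
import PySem

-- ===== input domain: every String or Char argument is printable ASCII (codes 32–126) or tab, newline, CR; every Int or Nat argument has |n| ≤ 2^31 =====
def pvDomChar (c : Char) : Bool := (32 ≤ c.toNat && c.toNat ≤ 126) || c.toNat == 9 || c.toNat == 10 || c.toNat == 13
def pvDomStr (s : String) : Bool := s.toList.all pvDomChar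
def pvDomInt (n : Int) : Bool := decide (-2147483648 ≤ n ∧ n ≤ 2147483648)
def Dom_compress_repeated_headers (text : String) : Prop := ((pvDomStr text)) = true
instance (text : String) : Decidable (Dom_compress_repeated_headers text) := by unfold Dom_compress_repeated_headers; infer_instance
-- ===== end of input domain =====

-- B replaces A's interleaved index loop (with a nested duplicate-skipping while) by a two-pass
-- decomposition: parse lines into a section table, then a separate emission pass (objective: alternative).

-- shared primitive: line.lstrip('#').strip() — dropWhile is exact for lstrip with the single char '#'
def pvHeaderText (line : List Char) : List Char :=
  PySem.Chars.strip (line.dropWhile (fun c => c == '#'))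

-- line.startswith('#')
def pvIsHeader (l : List Char) : Bool := PySem.Chars.startswith l ['#']

-- bool(line.strip())
def pvNonBlank (l : List Char) : Bool := !decide (PySem.Chars.strip l = [])

-- ===== PORT A =====
-- A's inner while: consume non-header lines, appending the non-blank ones to result;
-- returns (result, remaining lines)
def pvInnerA : List (List Char) → List (List Char) → List (List Char) × List (List Char)
  | [], result => (result, [])
  | l :: rest, result =>
    if pvIsHeader l then (result, l :: rest)
    else pvInnerA rest (if pvNonBlank l then result ++ [l] else result)

theorem pvInnerA_len : ∀ (ls res : List (List Char)), (pvInnerA ls res).2.length ≤ ls.length := by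
  intro ls
  induction ls with
  | nil => intro res; simp [pvInnerA]
  | cons l rest ih =>
    intro res
    simp only [pvInnerA]
    split
    · simp
    · exact le_trans (ih _) (Nat.le_succ _)

-- A's outer while over the remaining lines, with the seen-headers dict and the result list
def pvLoopA : List (List Char) → PySem.Dict (List Char) Int → List (List Char) → List (List Char)
  | [], _, result => result
  | line :: rest, seen, result =>
    if pvIsHeader line then
      if seen.contains (pvHeaderText line) then
        pvLoopA (pvInnerA rest result).2 seen (pvInnerA rest result).1
      else
        pvLoopA rest (seen.insert (pvHeaderText line) (result.length : Int)) (result ++ [line])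
    else
      pvLoopA rest seen (result ++ [line])
termination_by ls _ _ => ls.length
decreasing_by
  · exact Nat.lt_succ_of_le (pvInnerA_len rest result)
  · exact Nat.lt_succ_self _
  · exact Nat.lt_succ_self _

def compress_repeated_headers (text : String) : String :=
  if text.toList = [] then "" else
  String.ofList (PySem.Chars.join ['\n']
    (pvLoopA (PySem.Chars.splitOn text.toList ['\n']) PySem.Dict.empty []))

-- ===== PORT B =====
-- pass 1 of Source B: the for-loop body over (sections, cur_header, cur_body)
def pvParseStep (st : List (Option (List Char) × List (List Char)) × Option (List Char) × List (List Char))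
    (line : List Char) :
    List (Option (List Char) × List (List Char)) × Option (List Char) × List (List Char) :=
  if pvIsHeader line then (st.1 ++ [(st.2.1, st.2.2)], some line, [])
  else (st.1, st.2.1, st.2.2 ++ [line])

def pvParse (lines : List (List Char)) : List (Option (List Char) × List (List Char)) :=
  let st := lines.foldl pvParseStep ([], none, [])
  st.1 ++ [(st.2.1, st.2.2)]

-- pass 2 of Source B: emit sections with a seen set
def pvEmit : List (Option (List Char) × List (List Char)) → PySem.Set (List Char) → List (List Char) → List (List Char)
  | [], _, out => out
  | (none, body) :: rest, seen, out => pvEmit rest seen (out ++ body)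
  | (some h, body) :: rest, seen, out =>
    if PySem.Set.contains seen (pvHeaderText h) then
      pvEmit rest seen (out ++ body.filter pvNonBlank)
    else
      pvEmit rest (PySem.Set.add seen (pvHeaderText h)) (out ++ [h] ++ body)

def compress_repeated_headers_alt (text : String) : String :=
  if text.toList = [] then "" else
  String.ofList (PySem.Chars.join ['\n']
    (pvEmit (pvParse (PySem.Chars.splitOn text.toList ['\n'])) PySem.Set.empty []))

-- ===== PRECONDITION & SPEC =====
def Spec_compress_repeated_headers (text : String) (out : String) : Prop := out = compress_repeated_headers_alt text
instance (text : String) (out : String) : Decidable (Spec_compress_repeated_headers text out) := by unfold Spec_compress_repeated_headers; infer_instance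

-- ===== CLAIM (what is proved, stated in full; the proofs are below) =====
def Claim_equal_compress_repeated_headers : Prop := ∀ (text : String), Dom_compress_repeated_headers text → Spec_compress_repeated_headers text (compress_repeated_headers text)

-- ===== LEMMAS AND PROOFS =====

-- recursive characterization of pass 1's fold
def pvCloseRec : Option (List Char) → List (List Char) → List (List Char) → List (Option (List Char) × List (List Char))
  | hdr, body, [] => [(hdr, body)]
  | hdr, body, l :: rest =>
    if pvIsHeader l then (hdr, body) :: pvCloseRec (some l) [] rest
    else pvCloseRec hdr (body ++ [l]) rest

theorem pvParse_eq_aux : ∀ (lines : List (List Char)) secs hdr body,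
    (let st := lines.foldl pvParseStep (secs, hdr, body); st.1 ++ [(st.2.1, st.2.2)])
      = secs ++ pvCloseRec hdr body lines := by
  intro lines
  induction lines with
  | nil => intro secs hdr body; simp [pvCloseRec]
  | cons l rest ih =>
    intro secs hdr body
    by_cases h : pvIsHeader l = true
    · simp [pvParseStep, pvCloseRec, h, ih]
    · simp [pvParseStep, pvCloseRec, h, ih]

theorem pvParse_eq (lines : List (List Char)) : pvParse lines = pvCloseRec none [] lines := by
  simpa [pvParse] using pvParse_eq_aux lines [] none []

theorem pvInnerA_eq : ∀ (ls res : List (List Char)),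
    pvInnerA ls res = (res ++ (ls.takeWhile (fun l => !pvIsHeader l)).filter pvNonBlank,
      ls.dropWhile (fun l => !pvIsHeader l)) := by
  intro ls
  induction ls with
  | nil => intro res; simp [pvInnerA]
  | cons l rest ih =>
    intro res
    by_cases h : pvIsHeader l = true
    · simp [pvInnerA, h]
    · by_cases h2 : pvNonBlank l = true
      · simp [pvInnerA, h, h2, ih]
      · simp [pvInnerA, h, h2, ih]

-- E1: a pending headerless body is just appended output
theorem pvEmit_none_body : ∀ (lines : List (List Char)) body seen out,
    pvEmit (pvCloseRec none body lines) seen out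
      = pvEmit (pvCloseRec none [] lines) seen (out ++ body) := by
  intro lines
  induction lines with
  | nil => intro body seen out; simp [pvCloseRec, pvEmit]
  | cons l rest ih =>
    intro body seen out
    by_cases h : pvIsHeader l = true
    · simp [pvCloseRec, pvEmit, h]
    · simp only [pvCloseRec, h, Bool.false_eq_true, if_false, List.nil_append]
      rw [ih, ih [l], List.append_assoc]

-- E2: an open unseen-header section = emit the header and body now, mark it seen
theorem pvEmit_some_unseen : ∀ (lines : List (List Char)) h body seen out,
    PySem.Set.contains seen (pvHeaderText h) = false →
    pvEmit (pvCloseRec (some h) body lines) seen out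
      = pvEmit (pvCloseRec none [] lines) (PySem.Set.add seen (pvHeaderText h)) (out ++ [h] ++ body) := by
  intro lines
  induction lines with
  | nil =>
    intro h body seen out hs
    simp [pysem] at hs
    simp [pvCloseRec, pvEmit, hs]
  | cons l rest ih =>
    intro h body seen out hs
    by_cases hl : pvIsHeader l = true
    · have hs' := hs
      simp [pysem] at hs'
      simp [pvCloseRec, pvEmit, hl, hs']
    · simp only [pvCloseRec, hl, Bool.false_eq_true, if_false, List.nil_append]
      rw [ih _ _ _ _ hs, pvEmit_none_body _ [l]]
      simp [List.append_assoc]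

-- E3: an open seen-header section's pending body is emitted filtered
theorem pvEmit_some_seen_body : ∀ (lines : List (List Char)) h body seen out,
    PySem.Set.contains seen (pvHeaderText h) = true →
    pvEmit (pvCloseRec (some h) body lines) seen out
      = pvEmit (pvCloseRec (some h) [] lines) seen (out ++ body.filter pvNonBlank) := by
  intro lines
  induction lines with
  | nil =>
    intro h body seen out hs
    simp [pysem] at hs
    simp [pvCloseRec, pvEmit, hs]
  | cons l rest ih =>
    intro h body seen out hs
    by_cases hl : pvIsHeader l = true
    · have hs' := hs
      simp [pysem] at hs'
      simp [pvCloseRec, pvEmit, hl, hs']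
    · simp only [pvCloseRec, hl, Bool.false_eq_true, if_false, List.nil_append]
      rw [ih _ _ _ _ hs, ih _ [l] _ _ hs]
      simp [List.filter_append, List.append_assoc]

-- E4: a seen-header section = skip to the next header, appending its non-blank lines
theorem pvEmit_some_seen : ∀ (lines : List (List Char)) h seen out,
    PySem.Set.contains seen (pvHeaderText h) = true →
    pvEmit (pvCloseRec (some h) [] lines) seen out
      = pvEmit (pvCloseRec none [] (lines.dropWhile (fun l => !pvIsHeader l))) seen
          (out ++ (lines.takeWhile (fun l => !pvIsHeader l)).filter pvNonBlank) := by
  intro lines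
  induction lines with
  | nil =>
    intro h seen out hs
    simp [pysem] at hs
    simp [pvCloseRec, pvEmit, hs]
  | cons l rest ih =>
    intro h seen out hs
    by_cases hl : pvIsHeader l = true
    · have hs' := hs
      simp [pysem] at hs'
      simp [pvCloseRec, pvEmit, hl, hs']
    · simp only [pvCloseRec, hl, Bool.false_eq_true, if_false, List.nil_append]
      rw [pvEmit_some_seen_body _ _ [l] _ _ hs, ih _ _ _ hs]
      by_cases hb : pvNonBlank l = true <;> simp [hb, hl, List.append_assoc]

-- the seen dict of A and the seen set of B stay in step
theorem pvMatch_insert (d : PySem.Dict (List Char) Int) (s : PySem.Set (List Char)) (k : List Char) (v : Int)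
    (h : ∀ k', d.contains k' = PySem.Set.contains s k') :
    ∀ k', (d.insert k v).contains k' = PySem.Set.contains (PySem.Set.add s k) k' := by
  intro k'
  have hh := h k'
  simp [pysem] at hh ⊢
  simp [hh, Bool.or_comm]

theorem pvMain : ∀ (n : Nat) (lines : List (List Char)), lines.length ≤ n →
    ∀ (seenD : PySem.Dict (List Char) Int) (seenS : PySem.Set (List Char)) res,
    (∀ k, seenD.contains k = PySem.Set.contains seenS k) →
    pvLoopA lines seenD res = pvEmit (pvCloseRec none [] lines) seenS res := by
  intro n
  induction n with
  | zero =>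
    intro lines hlen seenD seenS res hm
    have h0 : lines = [] := List.eq_nil_of_length_eq_zero (Nat.le_zero.mp hlen)
    subst h0
    simp [pvLoopA, pvCloseRec, pvEmit]
  | succ n ih =>
    intro lines hlen seenD seenS res hm
    cases lines with
    | nil => simp [pvLoopA, pvCloseRec, pvEmit]
    | cons l rest =>
      have hr : rest.length ≤ n := by simpa using hlen
      by_cases hh : pvIsHeader l = true
      · by_cases hseen : seenD.contains (pvHeaderText l) = true
        · -- duplicate header: A skips it via the inner while, filtering blanks
          have hs : PySem.Set.contains seenS (pvHeaderText l) = true := by rw [← hm]; exact hseen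
          have hd : (rest.dropWhile (fun l => !pvIsHeader l)).length ≤ n :=
            le_trans (List.length_dropWhile_le _ _) hr
          simp only [pvLoopA, hh, hseen, if_true]
          rw [pvInnerA_eq]
          rw [ih _ hd seenD seenS _ hm]
          conv_rhs => rw [pvCloseRec]
          simp only [hh, if_true, pvEmit, List.append_nil]
          rw [pvEmit_some_seen _ _ _ _ hs]
        · -- first occurrence: A records it and keeps the line
          have hsD : seenD.contains (pvHeaderText l) = false := by simpa using hseen
          have hs : PySem.Set.contains seenS (pvHeaderText l) = false := by rw [← hm]; exact hsD
          simp only [pvLoopA, hh, hsD, if_true, Bool.false_eq_true, if_false]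
          rw [ih _ hr _ _ _ (pvMatch_insert _ _ _ _ hm)]
          conv_rhs => rw [pvCloseRec]
          simp only [hh, if_true, pvEmit, List.append_nil]
          rw [pvEmit_some_unseen _ _ _ _ _ hs]
          simp
      · -- ordinary body line
        simp only [pvLoopA, hh, Bool.false_eq_true, if_false]
        rw [ih _ hr _ _ _ hm]
        conv_rhs => rw [pvCloseRec]
        simp only [hh, Bool.false_eq_true, if_false, List.nil_append]
        rw [pvEmit_none_body _ [l]]

-- ===== VERDICT (by name: the statement is the Claim_ definition above) =====
theorem compress_repeated_headers_spec : Claim_equal_compress_repeated_headers := by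
  intro text _
  unfold Spec_compress_repeated_headers compress_repeated_headers compress_repeated_headers_alt
  by_cases h : text.toList = []
  · simp [h]
  · simp only [h, if_neg, not_false_iff]
    rw [pvParse_eq]
    rw [pvMain (PySem.Chars.splitOn text.toList ['\n']).length _ le_rfl PySem.Dict.empty PySem.Set.empty []
      (by intro k; simp [pysem])]
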